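-- pv_equiv track=rewrite | github.com/cqdev-co/portfolio | scripts/rh_portfolio_analysis.py | _merge_multiline_rows
-- ===== SOURCE A (Python) =====
-- def _merge_multiline_rows(rows: list[dict]) -> list[dict]:
--     """Merge rows that span multiple lines (CUSIP info)."""
--     cleaned = []
--     i = 0
--
--     while i < len(rows):
--         row = rows[i]
--
--         # Skip empty/disclaimer rows
--         if not row.get('Activity Date'):
--             i += 1
--             continue
--
--         # Check if next row is a CUSIP continuation
--         if (i + 1 < len(rows) and
--             rows[i + 1].get('Activity Date') == '' and
--             'CUSIP' in str(rows[i + 1].get('Description', ''))):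
--             # This is a multi-line stock description, merge
--             row['Description'] = (
--                 f"{row.get('Description', '')} "
--                 f"{rows[i + 1].get('Description', '')}"
--             )
--             i += 2
--         else:
--             i += 1
--
--         cleaned.append(row)
--
--     return cleaned
-- ===== SOURCE B (Python) =====
-- def _merge_multiline_rows(rows: list[dict]) -> list[dict]:
--     """Single forward pass with look-back: dated rows are appended and marked
--     mergeable; an immediately following CUSIP continuation row folds its
--     Description into the last appended row."""
--     cleaned = []
--     mergeable = False
--     for row in rows:
--         if row.get('Activity Date'):
--             cleaned.append(row)
--             mergeable = True
--         else:
--             if (mergeable and row.get('Activity Date') == '' and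
--                     'CUSIP' in str(row.get('Description', ''))):
--                 last = cleaned[-1]
--                 last['Description'] = (
--                     f"{last.get('Description', '')} "
--                     f"{row.get('Description', '')}"
--                 )
--             mergeable = False
--     return cleaned
-- ===== Notes on version B (the rewrite author's own statement) =====
-- stated objective: simpler
-- what changed: Replaces A's index-based while loop with look-ahead and i+=2 skipping by a single forward for-loop that appends dated rows and merges a continuation row back into the last appended row via a one-shot mergeable flag.
import Mathlib
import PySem

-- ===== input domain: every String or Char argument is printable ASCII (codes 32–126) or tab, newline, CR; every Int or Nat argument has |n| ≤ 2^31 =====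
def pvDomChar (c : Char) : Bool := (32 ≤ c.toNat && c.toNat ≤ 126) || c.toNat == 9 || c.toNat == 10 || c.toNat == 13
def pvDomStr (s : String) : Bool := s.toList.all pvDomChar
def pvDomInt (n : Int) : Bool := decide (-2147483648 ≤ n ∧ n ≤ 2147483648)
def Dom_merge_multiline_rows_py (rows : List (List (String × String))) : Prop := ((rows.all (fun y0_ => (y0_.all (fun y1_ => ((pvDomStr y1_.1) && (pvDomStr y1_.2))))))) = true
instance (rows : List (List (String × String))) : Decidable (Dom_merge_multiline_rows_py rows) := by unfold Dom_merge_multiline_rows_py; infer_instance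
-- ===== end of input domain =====

-- B replaces A's index/look-ahead while loop by a single forward pass with look-back merging
-- into the last appended row (objective: simpler). Both Pythons mutate the merged row's dict
-- in place (same object); the equivalence proved here is about the return value.

-- shared transliterations of subexpressions both Pythons contain verbatim:
-- row.get('Activity Date') is truthy
def pvTruthyAD (row : List (String × String)) : Bool :=
  !(((PySem.Dict.get? (PySem.Dict.mk row) "Activity Date").getD "") == "")
-- r.get('Activity Date') == '' and 'CUSIP' in str(r.get('Description', ''))
def pvContinues (r : List (String × String)) : Bool :=
  (PySem.Dict.get? (PySem.Dict.mk r) "Activity Date" == some "") &&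
  PySem.Str.isIn "CUSIP" (PySem.Dict.getD (PySem.Dict.mk r) "Description" "")
-- row['Description'] = f"{row.get('Description','')} {next.get('Description','')}"
def pvMergeDesc (row «next» : List (String × String)) : List (String × String) :=
  ((PySem.Dict.mk row).insert "Description"
    (PySem.Dict.getD (PySem.Dict.mk row) "Description" "" ++ " " ++
     PySem.Dict.getD (PySem.Dict.mk «next») "Description" "")).items

-- ===== PORT A =====
-- A's while loop over index i: skip non-dated rows, merge the look-ahead row on i+=2.
def pvLoopA : List (List (String × String)) → List (List (String × String))
  | [] => []
  | row :: rest =>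
    if pvTruthyAD row then
      match rest with
      | nxt :: rest' =>
        if pvContinues nxt then pvMergeDesc row nxt :: pvLoopA rest'
        else row :: pvLoopA (nxt :: rest')
      | [] => row :: pvLoopA []
    else pvLoopA rest

def merge_multiline_rows_py (rows : List (List (String × String))) : List (List (String × String)) :=
  pvLoopA rows

-- ===== PORT B =====
-- B's loop body: state = (cleaned reversed, mergeable flag).
def pvStepB (st : List (List (String × String)) × Bool) (row : List (String × String)) :
    List (List (String × String)) × Bool :=
  if pvTruthyAD row then (row :: st.1, true)
  else if st.2 && pvContinues row then
    (match st.1 with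
     | last :: acc => pvMergeDesc last row :: acc
     | [] => [], false)   -- unreachable: mergeable implies cleaned nonempty
  else (st.1, false)

def merge_multiline_rows_py_alt (rows : List (List (String × String))) : List (List (String × String)) :=
  ((rows.foldl pvStepB ([], false)).1).reverse

-- ===== PRECONDITION & SPEC =====
def Spec_merge_multiline_rows_py (rows : List (List (String × String))) (out : List (List (String × String))) : Prop := out = merge_multiline_rows_py_alt rows
instance (rows : List (List (String × String))) (out : List (List (String × String))) : Decidable (Spec_merge_multiline_rows_py rows out) := by unfold Spec_merge_multiline_rows_py; infer_instance

-- ===== CLAIM (what is proved, stated in full; the proofs are below) =====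
def Claim_equal_merge_multiline_rows_py : Prop := ∀ (rows : List (List (String × String))), Dom_merge_multiline_rows_py rows → Spec_merge_multiline_rows_py rows (merge_multiline_rows_py rows)

-- ===== LEMMAS AND PROOFS =====

-- a continuation row is never dated
theorem continues_not_truthy (r : List (String × String)) (h : pvContinues r = true) :
    pvTruthyAD r = false := by
  unfold pvContinues at h
  unfold pvTruthyAD
  rw [Bool.and_eq_true] at h
  have : PySem.Dict.get? (PySem.Dict.mk r) "Activity Date" = some "" := by
    simpa using h.1
  simp [this]

-- the mergeable flag is only read when the current row is a non-dated continuation row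
theorem flag_irrelevant (x : List (String × String)) (xs : List (List (String × String)))
    (acc : List (List (String × String))) (h : pvContinues x = false) :
    List.foldl pvStepB (acc, true) (x :: xs) = List.foldl pvStepB (acc, false) (x :: xs) := by
  simp only [List.foldl_cons]
  unfold pvStepB
  cases ht : pvTruthyAD x <;> simp_all

-- loop correspondence: B's fold from (acc, false) produces A's result (reversed) on top of acc
theorem foldB_eq : ∀ (rows acc : List (List (String × String))),
    (List.foldl pvStepB (acc, false) rows).1 = (pvLoopA rows).reverse ++ acc
  | [], acc => by simp [pvLoopA]
  | row :: rest, acc => by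
    cases ht : pvTruthyAD row with
    | false =>
      have hstep : pvStepB (acc, false) row = (acc, false) := by
        unfold pvStepB; simp [ht]
      rw [List.foldl_cons, hstep, foldB_eq rest acc,
        show pvLoopA (row :: rest) = pvLoopA rest from by rw [pvLoopA.eq_def]; simp [ht]]
    | true =>
      have hstep : pvStepB (acc, false) row = (row :: acc, true) := by
        unfold pvStepB; simp [ht]
      match rest with
      | [] =>
        simp [pvLoopA, ht, hstep]
      | nxt :: rest' =>
        cases hc : pvContinues nxt with
        | true =>
          have htn := continues_not_truthy nxt hc
          have hstep2 : pvStepB (row :: acc, true) nxt = (pvMergeDesc row nxt :: acc, false) := by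
            unfold pvStepB; simp [htn, hc]
          rw [List.foldl_cons, hstep, List.foldl_cons, hstep2,
            foldB_eq rest' (pvMergeDesc row nxt :: acc),
            show pvLoopA (row :: nxt :: rest') = pvMergeDesc row nxt :: pvLoopA rest' from by
              rw [pvLoopA.eq_def]; simp [ht, hc]]
          simp
        | false =>
          rw [List.foldl_cons, hstep, flag_irrelevant nxt rest' (row :: acc) hc,
            foldB_eq (nxt :: rest') (row :: acc),
            show pvLoopA (row :: nxt :: rest') = row :: pvLoopA (nxt :: rest') from by
              rw [pvLoopA.eq_def]; simp [ht, hc]]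
          simp

-- ===== VERDICT (by name: the statement is the Claim_ definition above) =====
theorem merge_multiline_rows_py_spec : Claim_equal_merge_multiline_rows_py := by
  intro rows _
  unfold Spec_merge_multiline_rows_py merge_multiline_rows_py merge_multiline_rows_py_alt
  rw [foldB_eq rows []]
  simp
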